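-- pv_equiv track=rewrite | github.com/IES-Rafael-Alberti/dawb1-2425-ejercicios-u2-GunterMagno | src/prueba_daw.py | crear_piramide
-- ===== SOURCE A (Python) =====
-- def crear_linea(num: int):
--     suma = 0
--     cadena = ""
--     for i in range(num+1):
--         suma += i
--
--         if cadena == "":
--             cadena = str(i)
--         else:
--             cadena = cadena + " + " + str(i)
--     if num != 0:
--         linea = f"{num} => {cadena} = {suma}"
--     else:
--         linea = f"{num} => {cadena} = {suma}"
--
--
--     return linea
--
-- def crear_piramide(num, order):
--     piramide = ""
--     if order == 1:
--         for i in range(0, num+1):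
--             x = num-i
--             if x != 0:
--                 piramide += crear_linea(x) + "\n"
--             else:
--                 piramide += crear_linea(x)
--     elif order == -1:
--         for i in range(num):
--             piramide += crear_linea(i+1) + "\n"
--
--     return piramide
-- ===== SOURCE B (Python) =====
-- def crear_linea(num: int):
--     suma = num * (num + 1) // 2
--     cadena = " + ".join(map(str, range(num + 1)))
--     return f"{num} => {cadena} = {suma}"
--
--
-- def crear_piramide(num, order):
--     if order == 1:
--         return "\n".join(crear_linea(x) for x in range(num, -1, -1))
--     elif order == -1:
--         return "".join(crear_linea(i) + "\n" for i in range(1, num + 1))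
--     return ""
-- ===== Notes on version B (the rewrite author's own statement) =====
-- stated objective: simpler
-- what changed: crear_linea's running-sum accumulator and conditional string-concatenation loop are replaced by the closed form num*(num+1)//2 and ' + '.join(map(str, range(num+1))), and the outer piramide-accumulating loops are replaced by '\n'.join over range(num, -1, -1) (order 1, so the last line naturally gets no newline) and ''.join over range(1, num+1) (order -1).
import Mathlib
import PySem

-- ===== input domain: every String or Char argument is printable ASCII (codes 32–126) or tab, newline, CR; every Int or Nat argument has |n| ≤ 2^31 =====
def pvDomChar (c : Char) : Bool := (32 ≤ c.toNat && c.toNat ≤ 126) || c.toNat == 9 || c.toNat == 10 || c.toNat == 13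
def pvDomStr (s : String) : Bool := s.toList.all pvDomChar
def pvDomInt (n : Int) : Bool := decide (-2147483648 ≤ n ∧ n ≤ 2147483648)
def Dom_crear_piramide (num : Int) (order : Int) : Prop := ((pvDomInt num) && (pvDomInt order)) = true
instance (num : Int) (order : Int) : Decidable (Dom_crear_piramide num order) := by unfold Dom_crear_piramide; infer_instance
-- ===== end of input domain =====

-- B replaces A's running-sum/accumulator line builder by the closed form num*(num+1)//2 plus a ' + '.join,
-- and replaces the outer string-accumulating loops by '\n'.join over a descending range (objective: simpler/idiomatic).

-- ===== PORT A =====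
def crear_linea (num : Int) : String :=
  let st :=
    (PySem.List.pyRange 0 (num + 1) 1).foldl
      (fun (p : Int × String) i =>
        (p.1 + i,
         if p.2 = "" then PySem.Int.toStr i else p.2 ++ " + " ++ PySem.Int.toStr i))
      (0, "")
  if num ≠ 0 then
    PySem.Int.toStr num ++ " => " ++ st.2 ++ " = " ++ PySem.Int.toStr st.1
  else
    PySem.Int.toStr num ++ " => " ++ st.2 ++ " = " ++ PySem.Int.toStr st.1

def crear_piramide (num : Int) (order : Int) : String :=
  if order = 1 then
    (PySem.List.pyRange 0 (num + 1) 1).foldl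
      (fun piramide i =>
        let x := num - i
        if x ≠ 0 then piramide ++ (crear_linea x ++ "\n") else piramide ++ crear_linea x)
      ""
  else if order = -1 then
    (PySem.List.pyRange 0 num 1).foldl
      (fun piramide i => piramide ++ (crear_linea (i + 1) ++ "\n")) ""
  else ""

-- ===== PORT B =====
def crear_linea_B (num : Int) : String :=
  let suma := PySem.Int.floordiv (num * (num + 1)) 2
  let cadena := PySem.Str.join " + " ((PySem.List.pyRange 0 (num + 1) 1).map PySem.Int.toStr)
  PySem.Int.toStr num ++ " => " ++ cadena ++ " = " ++ PySem.Int.toStr suma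

def crear_piramide_alt (num : Int) (order : Int) : String :=
  if order = 1 then
    PySem.Str.join "\n" ((PySem.List.pyRange num (-1) (-1)).map crear_linea_B)
  else if order = -1 then
    PySem.Str.join "" ((PySem.List.pyRange 1 (num + 1) 1).map (fun i => crear_linea_B i ++ "\n"))
  else ""

-- ===== PRECONDITION & SPEC =====
def Spec_crear_piramide (num : Int) (order : Int) (out : String) : Prop := out = crear_piramide_alt num order
instance (num : Int) (order : Int) (out : String) : Decidable (Spec_crear_piramide num order out) := by unfold Spec_crear_piramide; infer_instance

-- ===== CLAIM (what is proved, stated in full; the proofs are below) =====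
def Claim_equal_crear_piramide : Prop := ∀ (num : Int) (order : Int), Dom_crear_piramide num order → Spec_crear_piramide num order (crear_piramide num order)

-- ===== LEMMAS AND PROOFS =====

-- string-level corollaries of the PySem.Chars.join lemmas
theorem sjoin_nil (sep : String) : PySem.Str.join sep [] = "" := by
  apply String.toList_inj.mp
  simp [PySem.Str.toList_join, PySem.Chars.join_nil]

theorem sjoin_singleton (sep p : String) : PySem.Str.join sep [p] = p := by
  apply String.toList_inj.mp
  simp [PySem.Str.toList_join, PySem.Chars.join_singleton]

theorem sjoin_cons_cons (sep p q : String) (r : List String) :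
    PySem.Str.join sep (p :: q :: r) = p ++ sep ++ PySem.Str.join sep (q :: r) := by
  apply String.toList_inj.mp
  simp [PySem.Str.toList_join, PySem.Chars.join_cons_cons, String.toList_append, String.append_assoc]

theorem sjoin_empty_cons (p : String) (r : List String) :
    PySem.Str.join "" (p :: r) = p ++ PySem.Str.join "" r := by
  cases r with
  | nil => simp [sjoin_singleton, sjoin_nil]
  | cons q r =>
    rw [sjoin_cons_cons]
    apply String.toList_inj.mp
    simp [String.toList_append]

-- pulling a fixed prefix out of a string-appending fold
theorem foldl_append_pull (h : Int → String) (l : List Int) (a b : String) :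
    l.foldl (fun acc x => acc ++ h x) (a ++ b) = a ++ l.foldl (fun acc x => acc ++ h x) b := by
  induction l generalizing b with
  | nil => rfl
  | cons x l ih => simp only [List.foldl_cons, String.append_assoc, ih]

-- once the accumulator is nonempty, A's line builder always takes the else branch
theorem gfold_ne (l : List Int) (acc : String) (h : acc ≠ "") :
    l.foldl (fun c i => if c = "" then PySem.Int.toStr i else c ++ " + " ++ PySem.Int.toStr i) acc
      = l.foldl (fun c i => c ++ " + " ++ PySem.Int.toStr i) acc := by
  induction l generalizing acc with
  | nil => rfl
  | cons x l ih =>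
    simp only [List.foldl_cons, if_neg h]
    refine ih _ ?_
    intro hE
    have := congrArg String.toList hE
    simp [String.toList_append] at this

-- ' + '.join over a nonempty list is A's else-branch fold
theorem join_eq_foldl (xs : List Int) (x : Int) :
    PySem.Str.join " + " ((x :: xs).map PySem.Int.toStr)
      = xs.foldl (fun c i => c ++ " + " ++ PySem.Int.toStr i) (PySem.Int.toStr x) := by
  induction xs generalizing x with
  | nil => simp [sjoin_singleton]
  | cons y ys ih =>
    rw [List.map_cons, List.map_cons, sjoin_cons_cons, ← List.map_cons, ih y]
    simp only [List.foldl_cons]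
    have h1 : PySem.Int.toStr x ++ " + " ++ PySem.Int.toStr y
        = (PySem.Int.toStr x ++ " + ") ++ (PySem.Int.toStr y ++ "") := by
      simp [String.append_assoc]
    rw [h1]
    have := foldl_append_pull (fun i => " + " ++ PySem.Int.toStr i) ys
      (PySem.Int.toStr x ++ " + ") (PySem.Int.toStr y ++ "")
    simp only [String.append_assoc] at this ⊢
    rw [this]
    simp

-- Gauss
theorem sum_range_mul_two (m : Nat) : (List.range (m + 1)).sum * 2 = (m + 1) * m := by
  induction m with
  | zero => decide
  | succ m ih =>
    rw [List.range_succ, List.sum_append]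
    simp only [List.sum_cons, List.sum_nil]
    calc ((List.range (m+1)).sum + (m + 1 + 0)) * 2
        = (List.range (m+1)).sum * 2 + (m+1)*2 := by ring
      _ = (m+1)*m + (m+1)*2 := by rw [ih]
      _ = (m + 1 + 1) * (m + 1) := by ring

theorem sum_fold (m : Nat) :
    (PySem.List.pyRange 0 ((m : Int) + 1) 1).foldl (fun s i => s + i) 0
      = PySem.Int.floordiv ((m : Int) * ((m : Int) + 1)) 2 := by
  have hr : ((m : Int) + 1) = ((m + 1 : Nat) : Int) := by push_cast; ring
  conv_lhs => rw [hr, PySem.List.pyRange_zero_natCast]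
  rw [List.foldl_map]
  rw [PySem.List.foldl_add (List.range (m+1)) (fun k => (k : Int)) 0]
  have h2 : (m : Int) * ((m : Int) + 1) = ((m * (m + 1) : Nat) : Int) := by push_cast; ring
  rw [h2]
  have h3 : (2 : Int) = ((2 : Nat) : Int) := rfl
  rw [h3, PySem.Int.floordiv_natCast]
  have h5 : ((List.range (m+1)).map (fun (k : Nat) => (k : Int))).sum
      = (((List.range (m+1)).sum : Nat) : Int) := by rw [Nat.cast_list_sum]
  rw [h5]
  have h6 := sum_range_mul_two m
  have hcomm : m * (m + 1) = (m + 1) * m := by ring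
  rw [hcomm]
  generalize hq : (m + 1) * m = q at h6 ⊢
  omega

-- A's crear_linea equals B's closed-form line for nonnegative arguments
theorem linea_eq (n : Int) (hn : 0 ≤ n) : crear_linea n = crear_linea_B n := by
  obtain ⟨m, rfl⟩ := Int.eq_ofNat_of_zero_le hn
  unfold crear_linea crear_linea_B
  rw [ite_self]
  rw [PySem.List.foldl_prod_mk (fun s i => s + i)
    (fun c i => if c = "" then PySem.Int.toStr i else c ++ " + " ++ PySem.Int.toStr i)]
  rw [sum_fold m]
  have hcons : PySem.List.pyRange 0 ((m : Int) + 1) 1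
      = 0 :: PySem.List.pyRange 1 ((m : Int) + 1) 1 := by
    exact PySem.List.pyRange_one_cons (by omega)
  rw [hcons, List.foldl_cons]
  have h0 : (if ("" : String) = "" then PySem.Int.toStr 0
      else "" ++ " + " ++ PySem.Int.toStr 0) = PySem.Int.toStr 0 := by simp
  rw [h0, gfold_ne _ _ (by decide), join_eq_foldl]

-- pyramid body (order 1): a fold whose last line gets no newline IS '\n'.join of the lines
theorem fold_last_zero (f : Int → String) (l : List Int) (h : ∀ x ∈ l, x ≠ 0) :
    (l ++ [0]).foldl (fun acc x => if x ≠ 0 then acc ++ (f x ++ "\n") else acc ++ f x) ""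
      = PySem.Str.join "\n" ((l ++ [0]).map f) := by
  induction l with
  | nil => simp [sjoin_singleton]
  | cons x l ih =>
    have hx : x ≠ 0 := h x (by simp)
    have hrest : ∀ y ∈ l, y ≠ 0 := fun y hy => h y (by simp [hy])
    simp only [List.cons_append, List.foldl_cons, if_pos hx, List.map_cons]
    have hne : ∃ p r, (l ++ [0]).map f = p :: r := by
      cases l with
      | nil => exact ⟨f 0, [], by simp⟩
      | cons a l => exact ⟨f a, (l ++ [0]).map f, by simp⟩
    obtain ⟨p, r, hpr⟩ := hne
    rw [hpr, sjoin_cons_cons, ← hpr, ← ih hrest]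
    have hb : ("" : String) ++ (f x ++ "\n") = (f x ++ "\n") ++ "" := by
      apply String.toList_inj.mp; simp [String.toList_append]
    rw [hb]
    have hpull : (l ++ [0]).foldl
        (fun acc x => if x ≠ 0 then acc ++ (f x ++ "\n") else acc ++ f x) ((f x ++ "\n") ++ "")
        = (f x ++ "\n") ++ (l ++ [0]).foldl
          (fun acc x => if x ≠ 0 then acc ++ (f x ++ "\n") else acc ++ f x) "" := by
      have hcongr : ∀ (init : String), (l ++ [0]).foldl
          (fun acc x => if x ≠ 0 then acc ++ (f x ++ "\n") else acc ++ f x) init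
          = (l ++ [0]).foldl (fun acc x => acc ++ (if x ≠ 0 then f x ++ "\n" else f x)) init := by
        intro init
        exact PySem.List.foldl_congr_mem _ _ _ _ (by intro acc' y _; split <;> rfl)
      rw [hcongr, hcongr, foldl_append_pull]
    rw [hpull]

-- fold_last_zero, composed with an index function over List.range
theorem fold_last_zero' (f : Int → String) (g : Nat → Int) (m : Nat)
    (h : ∀ k, k < m → g k ≠ 0) (h0 : g m = 0) :
    (List.range (m + 1)).foldl
        (fun acc k => if g k ≠ 0 then acc ++ (f (g k) ++ "\n") else acc ++ f (g k)) ""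
      = PySem.Str.join "\n" ((List.range (m + 1)).map (fun k => f (g k))) := by
  have hl : (List.range (m + 1)).map g = (List.range m).map g ++ [0] := by
    rw [List.range_succ, List.map_append]; simp [h0]
  have hz : ∀ x ∈ (List.range m).map g, x ≠ 0 := by
    intro x hx
    obtain ⟨k, hk, rfl⟩ := List.mem_map.mp hx
    exact h k (List.mem_range.mp hk)
  have := fold_last_zero f ((List.range m).map g) hz
  rw [← hl] at this
  simpa [List.foldl_map, List.map_map] using this

-- "".join of line+newline IS the appending fold (order -1)
theorem fold_join_empty (h : Int → String) (l : List Int) :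
    l.foldl (fun acc x => acc ++ h x) "" = PySem.Str.join "" (l.map h) := by
  induction l with
  | nil => simp [sjoin_nil]
  | cons x l ih =>
    simp only [List.foldl_cons, List.map_cons]
    rw [sjoin_empty_cons, ← ih]
    have hb : ("" : String) ++ h x = h x ++ "" := by
      apply String.toList_inj.mp; simp
    rw [hb, foldl_append_pull]

-- ===== VERDICT (by name: the statement is the Claim_ definition above) =====
theorem crear_piramide_spec : Claim_equal_crear_piramide := by
  intro num order _
  unfold Spec_crear_piramide crear_piramide crear_piramide_alt
  by_cases h1 : order = 1
  · simp only [if_pos h1]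
    by_cases hn : 0 ≤ num
    · obtain ⟨m, rfl⟩ := Int.eq_ofNat_of_zero_le hn
      have hr : ((m : Int) + 1) = ((m + 1 : Nat) : Int) := by push_cast; ring
      have hng : ((m : Int) - -1).toNat = m + 1 := by omega
      rw [hr, PySem.List.pyRange_zero_natCast, PySem.List.pyRange_neg_one, hng]
      simp only [List.foldl_map, List.map_map, Function.comp_def]
      have hc : (List.range (m + 1)).foldl
          (fun acc (k : Nat) =>
            let x := (m : Int) - (k : Int)
            if x ≠ 0 then acc ++ (crear_linea x ++ "\n") else acc ++ crear_linea x) ""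
          = (List.range (m + 1)).foldl
          (fun acc (k : Nat) =>
            if ((m : Int) - (k : Int)) ≠ 0 then acc ++ (crear_linea_B ((m : Int) - k) ++ "\n")
            else acc ++ crear_linea_B ((m : Int) - k)) "" := by
        refine PySem.List.foldl_congr_mem _ _ _ _ ?_
        intro acc k hk
        have hkm : k < m + 1 := List.mem_range.mp hk
        have hx : 0 ≤ (m : Int) - (k : Int) := by omega
        simp only [linea_eq _ hx]
      rw [hc]
      have hnz : ∀ k, k < m → (fun (k : Nat) => (m : Int) - k) k ≠ 0 := by
        intro k hk
        simp only []
        omega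
      have hz0 : (fun (k : Nat) => (m : Int) - k) m = 0 := by
        simp only []
        omega
      exact fold_last_zero' crear_linea_B (fun (k : Nat) => (m : Int) - k) m hnz hz0
    · have hA : PySem.List.pyRange 0 (num + 1) 1 = [] :=
        PySem.List.pyRange_one_eq_nil (by omega)
      have hB : PySem.List.pyRange num (-1) (-1) = [] :=
        PySem.List.pyRange_neg_one_eq_nil (by omega)
      rw [hA, hB]
      simp [sjoin_nil]
  · simp only [if_neg h1]
    by_cases h2 : order = -1
    · simp only [if_pos h2]
      by_cases hn : 0 ≤ num
      · obtain ⟨m, rfl⟩ := Int.eq_ofNat_of_zero_le hn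
        rw [PySem.List.pyRange_zero_natCast]
        have h1m : ((m : Int) + 1) - 1 = ((m : Nat) : Int) := by omega
        rw [PySem.List.pyRange_one, h1m]
        simp only [List.foldl_map, List.map_map, Function.comp_def, Int.toNat_natCast]
        have hc : (List.range m).foldl
            (fun acc (k : Nat) => acc ++ (crear_linea ((k : Int) + 1) ++ "\n")) ""
            = (List.range m).foldl
            (fun acc (k : Nat) => acc ++ (crear_linea_B ((k : Int) + 1) ++ "\n")) "" := by
          refine PySem.List.foldl_congr_mem _ _ _ _ ?_
          intro acc k _
          rw [linea_eq _ (by omega)]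
        rw [hc]
        have hmap : (List.range m).map (fun (k : Nat) => crear_linea_B (1 + (k : Int)) ++ "\n")
            = (List.range m).map (fun (k : Nat) => crear_linea_B ((k : Int) + 1) ++ "\n") := by
          apply List.map_congr_left
          intro k _
          rw [Int.add_comm]
        rw [hmap]
        have := fold_join_empty (fun x => crear_linea_B (x + 1) ++ "\n")
          ((List.range m).map (fun (k : Nat) => (k : Int)))
        simp only [List.foldl_map, List.map_map, Function.comp_def] at this
        exact this
      · have hA : PySem.List.pyRange 0 num 1 = [] :=
          PySem.List.pyRange_one_eq_nil (by omega)
        have hB : PySem.List.pyRange 1 (num + 1) 1 = [] :=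
          PySem.List.pyRange_one_eq_nil (by omega)
        rw [hA, hB]
        simp [sjoin_nil]
    · simp only [if_neg h2]
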